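-- pv_equiv track=rewrite | github.com/casss20/ledger-sdk | experimental/agent_runtime/core/constitution.py | _discloses_ai_identity
-- ===== SOURCE A (Python) =====
-- def _discloses_ai_identity(text: str) -> bool:
--     """Check if text discloses AI identity."""
--     indicators = [
--         "i am an ai",
--         "i'm an ai",
--         "i am a language model",
--         "i'm an assistant",
--         "as an ai"
--     ]
--     text_lower = text.lower()
--     return any(ind in text_lower for ind in indicators)
-- ===== SOURCE B (Python) =====
-- _INDICATORS = (
--     "i am an ai",
--     "i'm an ai",
--     "i am a language model",
--     "i'm an assistant",
--     "as an ai",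
-- )
--
--
-- def _discloses_ai_identity(text: str) -> bool:
--     """Single left-to-right pass: at each position of the lowered text,
--     test whether any indicator starts there (instead of five separate
--     substring scans)."""
--     t = text.lower()
--     for i in range(len(t) + 1):
--         for ind in _INDICATORS:
--             if t.startswith(ind, i):
--                 return True
--     return False
-- ===== Notes on version B (the rewrite author's own statement) =====
-- stated objective: alternative
-- what changed: Replaces five independent membership scans (one per indicator) with a single left-to-right pass that tests each position of the lowered text once against all indicators via startswith.
import Mathlib
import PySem

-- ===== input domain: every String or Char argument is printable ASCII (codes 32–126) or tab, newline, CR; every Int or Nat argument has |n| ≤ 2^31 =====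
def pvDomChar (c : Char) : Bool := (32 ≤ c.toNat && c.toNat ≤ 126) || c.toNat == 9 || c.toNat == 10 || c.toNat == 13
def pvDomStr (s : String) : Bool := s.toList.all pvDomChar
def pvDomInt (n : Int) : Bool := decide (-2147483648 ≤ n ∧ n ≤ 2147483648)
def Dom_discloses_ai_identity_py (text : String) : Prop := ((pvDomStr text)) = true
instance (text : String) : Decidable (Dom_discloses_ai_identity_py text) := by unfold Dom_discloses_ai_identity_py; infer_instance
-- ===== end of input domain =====

-- B replaces five separate 'ind in text' substring scans with one left-to-right
-- pass testing every position once against all indicators (objective: alternative).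

-- ===== PORT A =====
def pvIndicators : List String :=
  ["i am an ai", "i'm an ai", "i am a language model", "i'm an assistant", "as an ai"]

def discloses_ai_identity_py (text : String) : Bool :=
  let text_lower := PySem.Str.lower text
  pvIndicators.any (fun ind => PySem.Str.isIn ind text_lower)

-- ===== PORT B =====
def pvIndicatorsB : List (List Char) :=
  ["i am an ai".toList, "i'm an ai".toList, "i am a language model".toList,
   "i'm an assistant".toList, "as an ai".toList]

-- one pass: at each suffix (= position i) test all indicators with startswith
def pvScan : List Char → Bool
  | [] => pvIndicatorsB.any (fun ind => PySem.Chars.startswith [] ind)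
  | c :: rest =>
      if pvIndicatorsB.any (fun ind => PySem.Chars.startswith (c :: rest) ind) then true
      else pvScan rest

def discloses_ai_identity_py_alt (text : String) : Bool :=
  pvScan (PySem.Chars.lower text.toList)

-- ===== PRECONDITION & SPEC =====
def Spec_discloses_ai_identity_py (text : String) (out : Bool) : Prop := out = discloses_ai_identity_py_alt text
instance (text : String) (out : Bool) : Decidable (Spec_discloses_ai_identity_py text out) := by unfold Spec_discloses_ai_identity_py; infer_instance

-- ===== CLAIM (what is proved, stated in full; the proofs are below) =====
def Claim_equal_discloses_ai_identity_py : Prop := ∀ (text : String), Dom_discloses_ai_identity_py text → Spec_discloses_ai_identity_py text (discloses_ai_identity_py text)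

-- ===== LEMMAS AND PROOFS =====

-- the single pass finds exactly the indicators that are a prefix of some suffix
theorem pvScan_iff (t : List Char) :
    pvScan t = true ↔ ∃ ind ∈ pvIndicatorsB, ∃ j, ind <+: t.drop j := by
  induction t with
  | nil =>
      simp only [pvScan, List.any_eq_true, PySem.Chars.startswith_iff]
      constructor
      · rintro ⟨ind, h, hp⟩; exact ⟨ind, h, 0, by simpa using hp⟩
      · rintro ⟨ind, h, j, hp⟩; exact ⟨ind, h, by simpa using hp⟩
  | cons c rest ih =>
      simp only [pvScan]
      split_ifs with h
      · simp only [true_iff]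
        simp only [List.any_eq_true, PySem.Chars.startswith_iff] at h
        obtain ⟨ind, hmem, hp⟩ := h
        exact ⟨ind, hmem, 0, by simpa using hp⟩
      · simp only [List.any_eq_true, PySem.Chars.startswith_iff, not_exists, not_and] at h
        rw [ih]
        constructor
        · rintro ⟨ind, hmem, j, hp⟩
          exact ⟨ind, hmem, j + 1, by simpa using hp⟩
        · rintro ⟨ind, hmem, j, hp⟩
          cases j with
          | zero => exact absurd (by simpa using hp) (h ind hmem)
          | succ j => exact ⟨ind, hmem, j, by simpa using hp⟩

theorem pvIndicatorsB_eq : pvIndicatorsB = pvIndicators.map String.toList := rfl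

-- ===== VERDICT (by name: the statement is the Claim_ definition above) =====
theorem discloses_ai_identity_py_spec : Claim_equal_discloses_ai_identity_py := by
  intro text _
  unfold Spec_discloses_ai_identity_py discloses_ai_identity_py discloses_ai_identity_py_alt
  rw [Bool.eq_iff_iff, List.any_eq_true]
  rw [pvScan_iff, pvIndicatorsB_eq]
  have key : ∀ ind : String,
      PySem.Str.isIn ind (PySem.Str.lower text)
        = PySem.Chars.isIn ind.toList (PySem.Chars.lower text.toList) := by
    intro ind; rw [← PySem.Str.toList_lower]; exact PySem.Str.isIn_eq ind (PySem.Str.lower text)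
  simp only [key, List.mem_map]
  constructor
  · rintro ⟨ind, hmem, hin⟩
    exact ⟨ind.toList, ⟨ind, hmem, rfl⟩, (PySem.Chars.exists_prefix_drop_iff_isIn _ _).mpr hin⟩
  · rintro ⟨_, ⟨ind, hmem, rfl⟩, hj⟩
    exact ⟨ind, hmem, (PySem.Chars.exists_prefix_drop_iff_isIn _ _).mp hj⟩
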